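-- pv_equiv track=rewrite | github.com/ville-k/slurm_sdk | src/slurm/cli/formatters.py | _aggregate_partitions
-- ===== SOURCE A (Python) =====
-- from typing import Any, Dict, List
--
-- def _aggregate_partitions(partitions: List[Dict[str, Any]]) -> List[Dict[str, Any]]:
--     """Aggregate partition rows by partition name.
--
--     SLURM's sinfo returns one row per partition per node state. This function
--     aggregates them to show one row per partition with total nodes and a
--     summary of node states.
--     """
--     aggregated: Dict[str, Dict[str, Any]] = {}
--
--     for partition in partitions:
--         name = str(
--             partition.get("PARTITION", "") or partition.get("partition", "") or ""
--         )
--         if not name: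
--             continue
--
--         nodes_str = str(partition.get("NODES", "") or partition.get("nodes", "") or "0")
--         try:
--             nodes = int(nodes_str)
--         except ValueError:
--             nodes = 0
--
--         state = str(partition.get("STATE", "") or partition.get("state", "") or "")
--
--         if name not in aggregated:
--             aggregated[name] = {
--                 "name": name,
--                 "avail": str(
--                     partition.get("AVAIL", "") or partition.get("avail", "") or ""
--                 ),
--                 "total_nodes": 0,
--                 "states": {},
--                 "timelimit": str(
--                     partition.get("TIMELIMIT", "")
--                     or partition.get("timelimit", "")
--                     or ""
--                 ),
--                 "cpus": str(
--                     partition.get("CPUS", "") or partition.get("cpus", "") or ""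
--                 ),
--                 "memory": str(
--                     partition.get("MEMORY", "") or partition.get("memory", "") or ""
--                 ),
--             }
--
--         aggregated[name]["total_nodes"] += nodes
--         if state and nodes > 0:
--             aggregated[name]["states"][state] = (
--                 aggregated[name]["states"].get(state, 0) + nodes
--             )
--
--     result = []
--     for name in sorted(aggregated.keys()):
--         data = aggregated[name]
--         states = data["states"]
--         if states:
--             state_summary = ", ".join(
--                 f"{count} {state}" for state, count in sorted(states.items())
--             )
--         else:
--             state_summary = "n/a"
--
--         result.append(
--             {
--                 "name": data["name"],
--                 "avail": data["avail"],
--                 "nodes": str(data["total_nodes"]),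
--                 "state": state_summary,
--                 "timelimit": data["timelimit"],
--                 "cpus": data["cpus"],
--                 "memory": data["memory"],
--             }
--         )
--
--     return result
-- ===== SOURCE B (Python) =====
-- def _aggregate_partitions(partitions):
--     """Group rows by partition name first, then reduce each group."""
--     groups = {}
--     for row in partitions:
--         name = str(row.get("PARTITION", "") or row.get("partition", "") or "")
--         if name:
--             groups.setdefault(name, []).append(row)
--
--     def field(row, upper, lower):
--         return str(row.get(upper, "") or row.get(lower, "") or "")
--
--     def nodes_of(row):
--         try:
--             return int(str(row.get("NODES", "") or row.get("nodes", "") or "0"))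
--         except ValueError:
--             return 0
--
--     result = []
--     for name in sorted(groups):
--         rows = groups[name]
--         first = rows[0]
--         total = sum(nodes_of(r) for r in rows)
--         states = {}
--         for r in rows:
--             state = field(r, "STATE", "state")
--             n = nodes_of(r)
--             if state and n > 0:
--                 states[state] = states.get(state, 0) + n
--         summary = (
--             ", ".join(f"{c} {s}" for s, c in sorted(states.items()))
--             if states
--             else "n/a"
--         )
--         result.append(
--             {
--                 "name": name,
--                 "avail": field(first, "AVAIL", "avail"),
--                 "nodes": str(total),
--                 "state": summary,
--                 "timelimit": field(first, "TIMELIMIT", "timelimit"),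
--                 "cpus": field(first, "CPUS", "cpus"),
--                 "memory": field(first, "MEMORY", "memory"),
--             }
--         )
--     return result
-- ===== Notes on version B (the rewrite author's own statement) =====
-- stated objective: alternative
-- what changed: A builds one dict of incrementally-merged summary records mutated per row; B instead buckets the raw rows into per-name groups in a first pass and then, over the sorted names, reduces each group (metadata from the first row, total as a sum, states histogram) in a second pass.
import Mathlib
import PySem

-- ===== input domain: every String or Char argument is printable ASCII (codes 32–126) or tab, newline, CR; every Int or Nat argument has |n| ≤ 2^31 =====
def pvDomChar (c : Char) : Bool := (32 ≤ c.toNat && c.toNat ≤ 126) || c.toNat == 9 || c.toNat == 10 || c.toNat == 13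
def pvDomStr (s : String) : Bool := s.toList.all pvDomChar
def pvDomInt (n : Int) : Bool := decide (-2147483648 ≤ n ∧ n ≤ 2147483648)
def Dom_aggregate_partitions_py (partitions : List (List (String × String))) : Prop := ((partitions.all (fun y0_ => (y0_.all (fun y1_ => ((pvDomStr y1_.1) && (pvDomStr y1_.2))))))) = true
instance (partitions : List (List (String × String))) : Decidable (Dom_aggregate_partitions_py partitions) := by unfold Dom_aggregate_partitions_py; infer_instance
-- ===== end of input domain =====

-- B restructures A: A merges each row into one dict of summary records; B buckets rows by name
-- first and then reduces each group over the sorted names. Same return value, proved below.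

-- shared literal helpers for the Python expressions both sources contain verbatim:
-- row.get(k, "") on an association list (first match)
def pvGetD (row : List (String × String)) (k dflt : String) : String :=
  ((row.find? (fun p => p.1 == k)).map (·.2)).getD dflt

-- str(row.get(U, "") or row.get(l, "") or "")
def pvField (row : List (String × String)) (U l : String) : String :=
  let a := pvGetD row U ""
  if a ≠ "" then a else
    let b := pvGetD row l ""
    if b ≠ "" then b else ""

def pvName (row : List (String × String)) : String := pvField row "PARTITION" "partition"
def pvState (row : List (String × String)) : String := pvField row "STATE" "state"

-- nodes_str = str(... or "0"); int(nodes_str) with ValueError -> 0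
def pvNodes (row : List (String × String)) : Int :=
  let s := pvField row "NODES" "nodes"
  (PySem.Int.ofStr? (if s = "" then "0" else s)).getD 0

structure PRec where
  name : String
  avail : String
  total : Int
  states : PySem.Dict String Int
  timelimit : String
  cpus : String
  memory : String
deriving DecidableEq, Repr

def pvDummy : PRec := ⟨"", "", 0, PySem.Dict.empty, "", "", ""⟩

-- the identical output-row construction both Pythons end with
def pvOutRow (name avail : String) (total : Int) (states : PySem.Dict String Int)
    (timelimit cpus memory : String) : List (String × String) :=
  let summary :=
    if states.items = [] then "n/a"
    else PySem.Str.join ", "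
      ((PySem.List.sorted2 states.items (fun p => p.1) (fun p => p.2) false).map
        (fun p => PySem.Int.toStr p.2 ++ " " ++ p.1))
  [("name", name), ("avail", avail), ("nodes", PySem.Int.toStr total), ("state", summary),
   ("timelimit", timelimit), ("cpus", cpus), ("memory", memory)]

-- ===== PORT A =====
-- one loop iteration of A: create the record if absent, then the two in-place mutations
-- (aggregated[name] is always present at the mutation sites, so getD's default is never used)
def pvStepA (agg : PySem.Dict String PRec) (row : List (String × String)) : PySem.Dict String PRec :=
  let n := pvName row
  if n = "" then agg else
    let nodes := pvNodes row
    let st := pvState row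
    let agg1 :=
      if agg.contains n then agg
      else agg.insert n ⟨n, pvField row "AVAIL" "avail", 0, PySem.Dict.empty,
            pvField row "TIMELIMIT" "timelimit", pvField row "CPUS" "cpus",
            pvField row "MEMORY" "memory"⟩
    let r1 := agg1.getD n pvDummy
    let agg2 := agg1.insert n { r1 with total := r1.total + nodes }
    if st ≠ "" ∧ nodes > 0 then
      let r2 := agg2.getD n pvDummy
      agg2.insert n { r2 with states := r2.states.modify st 0 (· + nodes) }
    else agg2

def aggregate_partitions_py (partitions : List (List (String × String))) : List (List (String × String)) :=
  let agg := partitions.foldl pvStepA PySem.Dict.empty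
  (PySem.List.sorted agg.keys (fun x => x) false).map (fun n =>
    let data := agg.getD n pvDummy
    pvOutRow data.name data.avail data.total data.states data.timelimit data.cpus data.memory)

-- ===== PORT B =====
-- first pass: groups.setdefault(name, []).append(row)
def pvStepG (g : PySem.Dict String (List (List (String × String)))) (row : List (String × String)) :
    PySem.Dict String (List (List (String × String))) :=
  let n := pvName row
  if n = "" then g else g.modify n [] (fun l => l ++ [row])

-- second pass over one group: first = rows[0] (groups' lists are never empty),
-- total = sum(nodes_of(r) ...), states histogram loop
def pvReduce (n : String) (rows : List (List (String × String))) : PRec :=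
  let first := rows.headD []
  ⟨n, pvField first "AVAIL" "avail",
   rows.foldl (fun t r => t + pvNodes r) 0,
   rows.foldl (fun d r =>
     if pvState r ≠ "" ∧ pvNodes r > 0 then d.modify (pvState r) 0 (· + pvNodes r) else d)
     PySem.Dict.empty,
   pvField first "TIMELIMIT" "timelimit", pvField first "CPUS" "cpus",
   pvField first "MEMORY" "memory"⟩

def aggregate_partitions_py_alt (partitions : List (List (String × String))) : List (List (String × String)) :=
  let g := partitions.foldl pvStepG PySem.Dict.empty
  (PySem.List.sorted g.keys (fun x => x) false).map (fun n =>
    let data := pvReduce n (g.getD n [])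
    pvOutRow data.name data.avail data.total data.states data.timelimit data.cpus data.memory)

-- ===== PRECONDITION & SPEC =====
def Spec_aggregate_partitions_py (partitions : List (List (String × String))) (out : List (List (String × String))) : Prop := out = aggregate_partitions_py_alt partitions
instance (partitions : List (List (String × String))) (out : List (List (String × String))) : Decidable (Spec_aggregate_partitions_py partitions out) := by unfold Spec_aggregate_partitions_py; infer_instance

-- ===== CLAIM (what is proved, stated in full; the proofs are below) =====
def Claim_equal_aggregate_partitions_py : Prop := ∀ (partitions : List (List (String × String))), Dom_aggregate_partitions_py partitions → Spec_aggregate_partitions_py partitions (aggregate_partitions_py partitions)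

-- ===== LEMMAS AND PROOFS =====

-- invariant tying A's record dict to B's group dict
def pvInv (agg : PySem.Dict String PRec) (g : PySem.Dict String (List (List (String × String)))) : Prop :=
  agg.keys = g.keys ∧ "" ∉ g.keys ∧
  ∀ n, n ∈ g.keys → g.getD n [] ≠ [] ∧ agg.getD n pvDummy = pvReduce n (g.getD n [])

theorem pvReduce_append (n : String) (rows : List (List (String × String))) (row : List (String × String))
    (h : rows ≠ []) :
    pvReduce n (rows ++ [row]) =
      { pvReduce n rows with
        total := (pvReduce n rows).total + pvNodes row,
        states := if pvState row ≠ "" ∧ pvNodes row > 0 then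
            (pvReduce n rows).states.modify (pvState row) 0 (· + pvNodes row)
          else (pvReduce n rows).states } := by
  obtain ⟨a, t, rfl⟩ : ∃ a t, rows = a :: t := by
    cases rows with
    | nil => exact absurd rfl h
    | cons a t => exact ⟨a, t, rfl⟩
  simp [pvReduce, List.foldl_append]

theorem pvInv_step (agg : PySem.Dict String PRec) (g : PySem.Dict String (List (List (String × String))))
    (row : List (String × String)) (h : pvInv agg g) : pvInv (pvStepA agg row) (pvStepG g row) := by
  obtain ⟨hk, hne, hmem⟩ := h
  by_cases hn : pvName row = ""
  · simpa [pvStepA, pvStepG, hn, pvInv] using ⟨hk, hne, hmem⟩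
  · have hcc : agg.contains (pvName row) = g.contains (pvName row) := by
      rw [PySem.Dict.contains_eq_decide_mem_keys, PySem.Dict.contains_eq_decide_mem_keys, hk]
    simp only [pvStepA, pvStepG, if_neg hn]
    by_cases hc : g.contains (pvName row) = true
    · -- existing partition: A updates the merged record, B appends to the group
      have hca : agg.contains (pvName row) = true := by rw [hcc]; exact hc
      have hmn : pvName row ∈ g.keys := (PySem.Dict.contains_iff_mem_keys _ _).mp hc
      obtain ⟨hrne, hrec⟩ := hmem (pvName row) hmn
      refine ⟨?_, ?_, ?_⟩
      · split_ifs <;>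
          simp [PySem.Dict.keys_insert_of_contains, PySem.Dict.contains_insert_self, hca,
            PySem.Dict.keys_modify, hc, hk]
      · rw [PySem.Dict.keys_modify, PySem.Dict.keys_insert_of_contains _ _ hc]
        exact hne
      · intro m hm
        rw [PySem.Dict.keys_modify, PySem.Dict.keys_insert_of_contains _ _ hc] at hm
        by_cases hmeq : m = pvName row
        · subst hmeq
          rw [PySem.Dict.getD_modify_self]
          constructor
          · simp
          · rw [pvReduce_append _ _ _ hrne]
            split_ifs with hcond <;>
              simp [PySem.Dict.getD_insert_self, hrec]
        · rw [PySem.Dict.getD_modify_of_ne _ _ _ hmeq]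
          have := hmem m hm
          refine ⟨this.1, ?_⟩
          split_ifs <;>
            simp [PySem.Dict.getD_insert_of_ne _ _ _ hmeq, this.2]
    · -- new partition: A inserts a fresh record, B starts a one-row group
      have hc' : g.contains (pvName row) = false := by simpa using hc
      have hca : agg.contains (pvName row) = false := by rw [hcc]; exact hc'
      have hgn : g.getD (pvName row) [] = [] := PySem.Dict.getD_of_not_contains _ _ hc'
      refine ⟨?_, ?_, ?_⟩
      · split_ifs <;>
          simp [PySem.Dict.keys_insert_of_contains, PySem.Dict.contains_insert_self,
            PySem.Dict.keys_insert_of_not_contains _ _ hca,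
            PySem.Dict.keys_insert_of_not_contains _ _ hc',
            PySem.Dict.keys_modify, hk]
      · rw [PySem.Dict.keys_modify, PySem.Dict.keys_insert_of_not_contains _ _ hc']
        simp only [List.mem_append, List.mem_singleton]
        rintro (h1 | h1)
        · exact hne h1
        · exact hn h1.symm
      · intro m hm
        rw [PySem.Dict.keys_modify, PySem.Dict.keys_insert_of_not_contains _ _ hc'] at hm
        by_cases hmeq : m = pvName row
        · subst hmeq
          rw [PySem.Dict.getD_modify_self, hgn]
          refine ⟨by simp, ?_⟩
          split_ifs with hcond <;>
            simp_all [PySem.Dict.getD_insert_self, pvReduce]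
        · have hm' : m ∈ g.keys := by
            rcases List.mem_append.mp hm with h1 | h1
            · exact h1
            · exact absurd (List.mem_singleton.mp h1) hmeq
          rw [PySem.Dict.getD_modify_of_ne _ _ _ hmeq]
          have := hmem m hm'
          refine ⟨this.1, ?_⟩
          split_ifs <;>
            simp [PySem.Dict.getD_insert_of_ne _ _ _ hmeq, this.2]

theorem pvInv_foldl (l : List (List (String × String)))
    (agg : PySem.Dict String PRec) (g : PySem.Dict String (List (List (String × String))))
    (h : pvInv agg g) : pvInv (l.foldl pvStepA agg) (l.foldl pvStepG g) := by
  induction l generalizing agg g with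
  | nil => exact h
  | cons x xs ih => exact ih _ _ (pvInv_step agg g x h)

-- ===== VERDICT (by name: the statement is the Claim_ definition above) =====
theorem aggregate_partitions_py_spec : Claim_equal_aggregate_partitions_py := by
  intro partitions _
  simp only [Spec_aggregate_partitions_py, aggregate_partitions_py, aggregate_partitions_py_alt]
  have h := pvInv_foldl partitions PySem.Dict.empty PySem.Dict.empty
    (by refine ⟨rfl, ?_, ?_⟩ <;> simp [PySem.Dict.keys_empty])
  obtain ⟨hkeys, -, hmap⟩ := h
  rw [hkeys]
  apply List.map_congr_left
  intro n hn
  have hn' : n ∈ (partitions.foldl pvStepG PySem.Dict.empty).keys :=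
    (PySem.List.mem_sorted _ _ _ _).mp hn
  have := hmap n hn'
  rw [this.2]
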